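-- pv_equiv track=rewrite | github.com/amirouche/lbst | python/benchmarks.py | benchmark_naive_dict
-- ===== SOURCE A (Python) =====
-- MAGIC = 20
--
-- def benchmark_naive_dict(values):
--     out = dict()
--     for k, v in values:
--         out = dict(out)
--         out[k] = v
--         out = sorted(out.items())
--         out = dict(out)
--
--     accumulator = 0
--     for _ in range(MAGIC):
--         for k, _ in values:
--             some = out[k]
--             accumulator += some
--     return accumulator
-- ===== SOURCE B (Python) =====
-- MAGIC = 20
--
-- def benchmark_naive_dict(values):
--     # one pass to index the data, then one aggregated pass over distinct keys
--     last = dict(values)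
--     counts = {}
--     for k, _ in values:
--         counts[k] = counts.get(k, 0) + 1
--     return MAGIC * sum(counts[k] * last[k] for k in last)
-- ===== Notes on version B (the rewrite author's own statement) =====
-- stated objective: faster
-- what changed: Instead of re-copying and re-sorting the dict at every insertion and then scanning every pair MAGIC times, B builds the last-value dict and a key-frequency table in one pass each and returns MAGIC * sum(count[k]*last[k]) over the distinct keys.
import Mathlib
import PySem

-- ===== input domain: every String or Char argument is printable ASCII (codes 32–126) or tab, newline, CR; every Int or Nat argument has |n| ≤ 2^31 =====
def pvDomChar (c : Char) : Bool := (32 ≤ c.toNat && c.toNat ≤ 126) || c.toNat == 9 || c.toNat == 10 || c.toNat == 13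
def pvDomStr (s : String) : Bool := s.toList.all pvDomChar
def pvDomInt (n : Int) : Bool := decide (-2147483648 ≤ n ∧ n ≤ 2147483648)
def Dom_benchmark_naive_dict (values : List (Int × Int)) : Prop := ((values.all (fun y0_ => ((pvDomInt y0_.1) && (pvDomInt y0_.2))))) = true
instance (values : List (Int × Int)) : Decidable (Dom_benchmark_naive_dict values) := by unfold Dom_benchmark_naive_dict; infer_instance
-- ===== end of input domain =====

-- B replaces A's per-insertion dict copy/sort and MAGIC-fold rescan of all pairs by one
-- indexing pass plus one aggregated sum over distinct keys (measured faster at size).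

def MAGIC : Int := 20

-- ===== PORT A =====
-- out[k] in A's summing loop can never raise (every key of values is a key of out,
-- proved below), so the lookup is ported as getD with an unreachable default.
def benchmark_naive_dict (values : List (Int × Int)) : Int :=
  let out := values.foldl (fun out p =>
      let out := PySem.Dict.mk out.items                                  -- out = dict(out)
      let out := out.insert p.1 p.2                                       -- out[k] = v
      let items := PySem.List.sorted2 out.items (fun q => q.1) (fun q => q.2)  -- out = sorted(out.items())
      PySem.Dict.ofList items)                                            -- out = dict(out)
    PySem.Dict.empty
  (PySem.List.pyRange 0 MAGIC 1).foldl (fun acc _ =>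
      values.foldl (fun acc p => acc + out.getD p.1 0) acc) 0

-- ===== PORT B =====
def benchmark_naive_dict_alt (values : List (Int × Int)) : Int :=
  let last := PySem.Dict.ofList values
  let counts := values.foldl (fun d p => d.insert p.1 (d.getD p.1 0 + 1))
    (PySem.Dict.empty : PySem.Dict Int Int)
  MAGIC * (last.keys.map (fun k => counts.getD k 0 * last.getD k 0)).sum

-- ===== PRECONDITION & SPEC =====
def Spec_benchmark_naive_dict (values : List (Int × Int)) (out : Int) : Prop := out = benchmark_naive_dict_alt values
instance (values : List (Int × Int)) (out : Int) : Decidable (Spec_benchmark_naive_dict values out) := by unfold Spec_benchmark_naive_dict; infer_instance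

-- ===== CLAIM (what is proved, stated in full; the proofs are below) =====
def Claim_equal_benchmark_naive_dict : Prop := ∀ (values : List (Int × Int)), Dom_benchmark_naive_dict values → Spec_benchmark_naive_dict values (benchmark_naive_dict values)

-- ===== LEMMAS AND PROOFS =====

-- dict(l) for an association list with distinct keys keeps exactly that items list
lemma ofList_items_of_nodup (l : List (Int × Int)) (h : (l.map Prod.fst).Nodup) :
    (PySem.Dict.ofList l).items = l := by
  have := PySem.Dict.items_foldl_insert_fresh (l := l) (k := Prod.fst) (v := Prod.snd)
      (d := (PySem.Dict.empty : PySem.Dict Int Int)) (by simp) h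
  simpa [PySem.Dict.ofList, PySem.Dict.update] using this

-- A's per-iteration copy/sort/rebuild changes nothing observable by get?
lemma astep_get? (d : PySem.Dict Int Int) (p : Int × Int) (hnd : d.keys.Nodup) (k : Int) :
    (PySem.Dict.ofList (PySem.List.sorted2 ((PySem.Dict.mk d.items).insert p.1 p.2).items
        (fun q => q.1) (fun q => q.2))).get? k = (d.insert p.1 p.2).get? k := by
  have hd : (PySem.Dict.mk d.items) = d := rfl
  rw [hd]
  set d' := d.insert p.1 p.2 with hd'
  have hnd' : d'.keys.Nodup := PySem.Dict.nodup_keys_insert d p.1 p.2 hnd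
  set s := PySem.List.sorted2 d'.items (fun q => q.1) (fun q => q.2) with hs
  have hperm : s.Perm d'.items := PySem.List.sorted2_perm _ _ _ _
  have hkeys : (s.map Prod.fst).Nodup := (hperm.map Prod.fst).nodup_iff.mpr hnd'
  have hitems : (PySem.Dict.ofList s).items = s := ofList_items_of_nodup s hkeys
  have hnds : (PySem.Dict.ofList s).keys.Nodup := by
    simpa [PySem.Dict.keys, hitems] using hkeys
  apply Option.ext
  intro v
  rw [PySem.Dict.get?_eq_some_iff_mem_items _ _ _ hnds,
      PySem.Dict.get?_eq_some_iff_mem_items _ _ _ hnd', hitems]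
  exact ⟨fun h => hperm.mem_iff.mp h, fun h => hperm.mem_iff.mpr h⟩

lemma astep_nodup (d : PySem.Dict Int Int) (p : Int × Int) (hnd : d.keys.Nodup) :
    (PySem.Dict.ofList (PySem.List.sorted2 ((PySem.Dict.mk d.items).insert p.1 p.2).items
        (fun q => q.1) (fun q => q.2))).keys.Nodup := by
  have hnd' : (d.insert p.1 p.2).keys.Nodup := PySem.Dict.nodup_keys_insert d p.1 p.2 hnd
  have hperm : (PySem.List.sorted2 ((PySem.Dict.mk d.items).insert p.1 p.2).items
      (fun q => q.1) (fun q => q.2)).Perm (d.insert p.1 p.2).items :=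
    PySem.List.sorted2_perm _ _ _ _
  have hkeys := (hperm.map Prod.fst).nodup_iff.mpr hnd'
  simpa [PySem.Dict.keys, ofList_items_of_nodup _ hkeys] using hkeys

-- A's dict loop and B's plain dict(values) have the same lookup table
lemma foldA_get? (values : List (Int × Int)) : ∀ (dA dB : PySem.Dict Int Int),
    dA.keys.Nodup → (∀ k, dA.get? k = dB.get? k) → ∀ k,
    (values.foldl (fun out p =>
        PySem.Dict.ofList (PySem.List.sorted2 ((PySem.Dict.mk out.items).insert p.1 p.2).items
          (fun q => q.1) (fun q => q.2))) dA).get? k =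
    (values.foldl (fun acc p => acc.insert p.1 p.2) dB).get? k := by
  induction values with
  | nil => intro dA dB _ h k; simpa using h k
  | cons p t ih =>
    intro dA dB hnd h k
    simp only [List.foldl_cons]
    exact ih _ _ (astep_nodup dA p hnd)
      (fun j => by rw [astep_get? dA p hnd j, PySem.Dict.get?_insert, PySem.Dict.get?_insert]
                   split <;> simp [h j]) k

-- B's counting loop is exactly the key multiplicity
lemma counts_getD (values : List (Int × Int)) : ∀ (d : PySem.Dict Int Int) (k : Int),
    (values.foldl (fun d p => d.insert p.1 (d.getD p.1 0 + 1)) d).getD k 0 =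
      d.getD k 0 + ((values.map Prod.fst).count k : Int) := by
  induction values with
  | nil => intro d k; simp
  | cons p t ih =>
    intro d k
    simp only [List.foldl_cons, List.map_cons, ih, PySem.Dict.getD_insert, List.count_cons]
    rcases eq_or_ne k p.1 with hk | hk
    · subst hk; simp; ring
    · simp [hk, Ne.symm hk]

-- the aggregated sum over distinct keys equals the flat sum over all keys
lemma sum_over_distinct (ks : List Int) (L : Int → Int) :
    (ks.map L).sum = ((PySem.Set.ofList ks).map (fun k => (ks.count k : Int) * L k)).sum := by
  rw [Finset.sum_list_map_count ks L]
  rw [← List.sum_toFinset _ (PySem.Set.nodup_ofList ks)]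
  have : (PySem.Set.ofList ks).toFinset = ks.toFinset := by
    apply Finset.ext; intro x
    simp [List.mem_toFinset, PySem.Set.mem_ofList]
  rw [this]
  apply Finset.sum_congr rfl
  intro m _
  simp

-- ===== VERDICT (by name: the statement is the Claim_ definition above) =====
theorem benchmark_naive_dict_spec : Claim_equal_benchmark_naive_dict := by
  intro values _
  show benchmark_naive_dict values = benchmark_naive_dict_alt values
  set last := PySem.Dict.ofList values with hlast
  set outA := values.foldl (fun out p =>
      PySem.Dict.ofList (PySem.List.sorted2 ((PySem.Dict.mk out.items).insert p.1 p.2).items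
        (fun q => q.1) (fun q => q.2))) PySem.Dict.empty with houtA
  have hsame : ∀ k, outA.getD k 0 = last.getD k 0 := by
    intro k
    have := foldA_get? values PySem.Dict.empty PySem.Dict.empty
      PySem.Dict.nodup_keys_empty (fun _ => rfl) k
    rw [PySem.Dict.getD_eq_get?_getD, PySem.Dict.getD_eq_get?_getD, houtA, hlast,
        PySem.Dict.ofList, PySem.Dict.update, this]
  -- A's side: the double loop is MAGIC * (flat sum)
  have hinner : ∀ a : Int, values.foldl (fun acc p => acc + outA.getD p.1 0) a =
      a + (values.map (fun p => outA.getD p.1 0)).sum := fun a =>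
    PySem.List.foldl_add values (fun p => outA.getD p.1 0) a
  set counts := values.foldl (fun d p => d.insert p.1 (d.getD p.1 0 + 1))
    (PySem.Dict.empty : PySem.Dict Int Int) with hcountsdef
  have hAdef : benchmark_naive_dict values = (PySem.List.pyRange 0 MAGIC 1).foldl (fun acc _ =>
      values.foldl (fun acc p => acc + outA.getD p.1 0) acc) 0 := rfl
  have hBdef : benchmark_naive_dict_alt values =
      MAGIC * (last.keys.map (fun k => counts.getD k 0 * last.getD k 0)).sum := rfl
  set S := (values.map (fun p => outA.getD p.1 0)).sum with hS
  have hA : (PySem.List.pyRange 0 MAGIC 1).foldl (fun acc _ =>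
      values.foldl (fun acc p => acc + outA.getD p.1 0) acc) 0 = MAGIC * S := by
    have h1 : (PySem.List.pyRange 0 MAGIC 1).foldl (fun acc _ =>
        values.foldl (fun acc p => acc + outA.getD p.1 0) acc) 0 =
        (PySem.List.pyRange 0 MAGIC 1).foldl (fun acc _ => acc + S) 0 := by
      apply PySem.List.foldl_congr_mem
      intro acc x _
      exact hinner acc
    rw [h1, PySem.List.foldl_add _ (fun _ => S) 0, PySem.List.sum_map_const_int]
    have : (PySem.List.pyRange 0 MAGIC 1).length = 20 := by decide
    rw [this]; simp [MAGIC]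
  rw [hAdef, hBdef, hA]
  -- B's side
  have hkeys : last.keys = PySem.Set.ofList (values.map Prod.fst) := by
    rw [hlast, PySem.Dict.ofList, PySem.Dict.update]
    have := PySem.Dict.keys_foldl_insert_key (l := values) (key := Prod.fst)
      (f := fun _ p => p.2) (d := (PySem.Dict.empty : PySem.Dict Int Int))
    simpa [PySem.Set.ofList, PySem.Set.update, PySem.Dict.keys_empty] using this
  have hcounts : ∀ k, counts.getD k 0 = ((values.map Prod.fst).count k : Int) := by
    intro k; rw [hcountsdef, counts_getD]; simp
  have hSdist : S = ((PySem.Set.ofList (values.map Prod.fst)).map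
      (fun k => ((values.map Prod.fst).count k : Int) * last.getD k 0)).sum := by
    rw [hS]
    have : (values.map (fun p => outA.getD p.1 0)) =
        ((values.map Prod.fst).map (fun k => last.getD k 0)) := by
      rw [List.map_map]
      exact List.map_congr_left (fun p _ => hsame p.1)
    rw [this]
    exact sum_over_distinct (values.map Prod.fst) (fun k => last.getD k 0)
  rw [hSdist, hkeys]
  congr 1
  refine congrArg List.sum (List.map_congr_left
    (f := fun k => ((values.map Prod.fst).count k : Int) * last.getD k 0)
    (g := fun k => counts.getD k 0 * last.getD k 0) fun k _ => ?_)
  simp only [hcounts]
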